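-- pv_equiv track=rewrite | github.com/paulyeo21/prep | delete_distance.py | delete_distance
-- ===== SOURCE A (Python) =====
-- def delete_distance(str1, str2):
--     occurrences = {}
--     for char in str1:
--         if char in occurrences:
--             occurrences[char] += 1
--         else:
--             occurrences[char] = 1
--
--     matched = 0
--     for char in str2:
--         if char in occurrences:
--             if occurrences[char] > 0:
--                 occurrences[char] -= 1
--                 matched += 1
--
--     return len(str1) + len(str2) - 2 * matched
-- ===== SOURCE B (Python) =====
-- def delete_distance(str1, str2):
--     matched = sum(min(str1.count(c), str2.count(c)) for c in set(str1) & set(str2))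
--     return len(str1) + len(str2) - 2 * matched
-- ===== Notes on version B (the rewrite author's own statement) =====
-- stated objective: idiomatic
-- what changed: Replaces the mutable count-table build plus decrement scan of str2 with a symmetric multiset-intersection formula: sum per-character minimum counts over the common characters.
import Mathlib
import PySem

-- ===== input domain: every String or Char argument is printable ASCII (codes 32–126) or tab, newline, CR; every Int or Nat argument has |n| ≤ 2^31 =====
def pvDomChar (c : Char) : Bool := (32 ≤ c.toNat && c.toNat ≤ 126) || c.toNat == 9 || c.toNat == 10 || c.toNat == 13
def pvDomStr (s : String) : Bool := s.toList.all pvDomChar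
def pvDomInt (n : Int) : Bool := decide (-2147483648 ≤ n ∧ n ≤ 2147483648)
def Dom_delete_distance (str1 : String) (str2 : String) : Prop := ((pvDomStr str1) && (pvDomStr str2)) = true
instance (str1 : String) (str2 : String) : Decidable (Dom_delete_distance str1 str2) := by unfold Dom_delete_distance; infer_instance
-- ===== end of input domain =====

-- B computes the same delete distance via the symmetric multiset-intersection formula
-- (sum of per-character minimum counts over the common characters) instead of A's
-- mutable count table decremented while scanning str2; alternative decomposition, not faster.

-- ===== PORT A =====
def delete_distance (str1 : String) (str2 : String) : Int :=
  let occ : PySem.Dict Char Int :=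
    str1.toList.foldl (fun d c =>
      if d.contains c then d.modify c 0 (· + 1) else d.insert c 1) PySem.Dict.empty
  let st :=
    str2.toList.foldl (fun (st : PySem.Dict Char Int × Int) c =>
      if st.1.contains c then
        if st.1.getD c 0 > 0 then (st.1.modify c 0 (· - 1), st.2 + 1) else st
      else st) (occ, 0)
  (str1.toList.length : Int) + (str2.toList.length : Int) - 2 * st.2

-- ===== PORT B =====
def delete_distance_alt (str1 : String) (str2 : String) : Int :=
  let l1 := str1.toList
  let l2 := str2.toList
  let inter := PySem.Set.inter (PySem.Set.ofList l1) (PySem.Set.ofList l2)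
  let matched := (inter.map (fun c => min (l1.count c : Int) (l2.count c : Int))).sum
  (l1.length : Int) + (l2.length : Int) - 2 * matched

-- ===== PRECONDITION & SPEC =====
def Spec_delete_distance (str1 : String) (str2 : String) (out : Int) : Prop := out = delete_distance_alt str1 str2
instance (str1 : String) (str2 : String) (out : Int) : Decidable (Spec_delete_distance str1 str2 out) := by unfold Spec_delete_distance; infer_instance

-- ===== CLAIM (what is proved, stated in full; the proofs are below) =====
def Claim_equal_delete_distance : Prop := ∀ (str1 : String) (str2 : String), Dom_delete_distance str1 str2 → Spec_delete_distance str1 str2 (delete_distance str1 str2)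

-- ===== LEMMAS AND PROOFS =====

-- after A's first loop, the table holds the character counts of l1
lemma loop1_getD (l : List Char) (d : PySem.Dict Char Int) (c : Char) :
    (l.foldl (fun d c =>
      if d.contains c then d.modify c 0 (· + 1) else d.insert c 1) d).getD c 0
      = d.getD c 0 + l.count c := by
  induction l generalizing d with
  | nil => simp
  | cons x t ih =>
    simp only [List.foldl_cons]
    by_cases h : d.contains x
    · rw [if_pos h, ih, PySem.Dict.getD_modify]
      by_cases hx : c = x
      · subst hx; simp [List.count_cons_self]; ring
      · simp [hx, eq_comm]
    · rw [if_neg h, ih, PySem.Dict.getD_insert]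
      by_cases hx : c = x
      · subst hx
        rw [PySem.Dict.getD_of_not_contains d 0 (by simpa using h)]
        simp [List.count_cons_self]; ring
      · simp [hx, eq_comm]

-- A's second loop computes Σ_{c} min(table c, count c) over the scanned suffix
lemma loop2_sum (l : List Char) (occ : PySem.Dict Char Int) (m : Int)
    (h0 : ∀ c, 0 ≤ occ.getD c 0) :
    (l.foldl (fun (st : PySem.Dict Char Int × Int) c =>
      if st.1.contains c then
        if st.1.getD c 0 > 0 then (st.1.modify c 0 (· - 1), st.2 + 1) else st
      else st) (occ, m)).2
      = m + ∑ c ∈ l.toFinset, min (occ.getD c 0) (l.count c : Int) := by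
  induction l generalizing occ m with
  | nil => simp
  | cons x t ih =>
    simp only [List.foldl_cons]
    by_cases hpos : occ.getD x 0 > 0
    · have hcont : occ.contains x = true := by
        cases hh : occ.contains x
        · rw [PySem.Dict.getD_of_not_contains occ 0 hh] at hpos; omega
        · rfl
      have h0' : ∀ c, 0 ≤ (occ.modify x 0 (· - 1)).getD c 0 := by
        intro c
        rw [PySem.Dict.getD_modify]
        split_ifs with h
        · subst h; omega
        · exact h0 c
      simp only [hcont, if_true, hpos, ih _ _ h0']
      have hterm : ∀ c ∈ t.toFinset, c ≠ x →
          min ((occ.modify x 0 (· - 1)).getD c 0) ((t.count c : Int))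
            = min (occ.getD c 0) (((x :: t).count c : Int)) := by
        intro c _ hcx
        rw [PySem.Dict.getD_modify_of_ne _ _ _ hcx]
        rw [List.count_cons_of_ne hcx.symm]
      by_cases hxt : x ∈ t
      · have hins : (x :: t).toFinset = t.toFinset := by
          simp [List.toFinset_cons, hxt]
        have hmem : x ∈ t.toFinset := List.mem_toFinset.mpr hxt
        rw [hins, ← Finset.add_sum_erase _ _ hmem, ← Finset.add_sum_erase _ _ hmem]
        have hx1 : min ((occ.modify x 0 (· - 1)).getD x 0) ((t.count x : Int)) + 1
            = min (occ.getD x 0) (((x :: t).count x : Int)) := by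
          rw [PySem.Dict.getD_modify_self]
          simp only [List.count_cons_self]
          push_cast
          omega
        have hrest : ∑ c ∈ t.toFinset.erase x,
              min ((occ.modify x 0 (· - 1)).getD c 0) ((t.count c : Int))
            = ∑ c ∈ t.toFinset.erase x, min (occ.getD c 0) (((x :: t).count c : Int)) :=
          Finset.sum_congr rfl fun c hc =>
            hterm c (Finset.mem_of_mem_erase hc) (Finset.ne_of_mem_erase hc)
        rw [hrest] at *
        omega
      · have hx0 : t.count x = 0 := List.count_eq_zero.mpr hxt
        rw [List.toFinset_cons, Finset.sum_insert (by simpa using hxt)]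
        have hx1 : min (occ.getD x 0) (((x :: t).count x : Int)) = 1 := by
          simp [List.count_cons_self, hx0]
          omega
        have hrest : ∑ c ∈ t.toFinset,
              min ((occ.modify x 0 (· - 1)).getD c 0) ((t.count c : Int))
            = ∑ c ∈ t.toFinset, min (occ.getD c 0) (((x :: t).count c : Int)) :=
          Finset.sum_congr rfl fun c hc =>
            hterm c hc (fun h => hxt (h ▸ List.mem_toFinset.mp hc))
        rw [hrest] at *
        omega
    · have h00 : occ.getD x 0 = 0 := le_antisymm (by omega) (h0 x)
      have hstep : (if occ.contains x = true then
          if occ.getD x 0 > 0 then (occ.modify x 0 (· - 1), m + 1) else (occ, m)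
          else (occ, m)) = (occ, m) := by
        split_ifs <;> simp_all
      simp only [hstep, ih _ _ h0]
      congr 1
      have hterm : ∀ c ∈ t.toFinset, c ≠ x →
          min (occ.getD c 0) ((t.count c : Int))
            = min (occ.getD c 0) (((x :: t).count c : Int)) := by
        intro c _ hcx
        rw [List.count_cons_of_ne hcx.symm]
      by_cases hxt : x ∈ t
      · have hins : (x :: t).toFinset = t.toFinset := by
          simp [List.toFinset_cons, hxt]
        have hmem : x ∈ t.toFinset := List.mem_toFinset.mpr hxt
        rw [hins, ← Finset.add_sum_erase _ _ hmem, ← Finset.add_sum_erase _ _ hmem]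
        have hrest : ∑ c ∈ t.toFinset.erase x, min (occ.getD c 0) ((t.count c : Int))
            = ∑ c ∈ t.toFinset.erase x, min (occ.getD c 0) (((x :: t).count c : Int)) :=
          Finset.sum_congr rfl fun c hc =>
            hterm c (Finset.mem_of_mem_erase hc) (Finset.ne_of_mem_erase hc)
        rw [hrest]
        simp [h00]
        positivity
      · rw [List.toFinset_cons, Finset.sum_insert (by simpa using hxt)]
        have hrest : ∑ c ∈ t.toFinset, min (occ.getD c 0) ((t.count c : Int))
            = ∑ c ∈ t.toFinset, min (occ.getD c 0) (((x :: t).count c : Int)) :=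
          Finset.sum_congr rfl fun c hc =>
            hterm c hc (fun h => hxt (h ▸ List.mem_toFinset.mp hc))
        rw [hrest]
        simp [h00]
        positivity

-- the two matched totals coincide
lemma matched_eq (l1 l2 : List Char) :
    ((PySem.Set.inter (PySem.Set.ofList l1) (PySem.Set.ofList l2)).map
        (fun c => min (l1.count c : Int) (l2.count c : Int))).sum
      = ∑ c ∈ l2.toFinset, min ((l1.count c : Int)) (l2.count c : Int) := by
  have hnd : (PySem.Set.inter (PySem.Set.ofList l1) (PySem.Set.ofList l2)).Nodup :=
    PySem.Set.nodup_inter _ _ (PySem.Set.nodup_ofList l1)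
  rw [← List.sum_toFinset _ hnd]
  apply Finset.sum_subset
  · intro c hc
    rw [List.mem_toFinset] at hc ⊢
    rw [PySem.Set.mem_inter] at hc
    exact (PySem.Set.mem_ofList _ _).mp hc.2
  · intro c hc2 hci
    rw [List.mem_toFinset] at hc2
    rw [List.mem_toFinset, PySem.Set.mem_inter] at hci
    have hc1 : c ∉ l1 := by
      intro h
      exact hci ⟨(PySem.Set.mem_ofList _ _).mpr h, (PySem.Set.mem_ofList _ _).mpr hc2⟩
    simp [List.count_eq_zero.mpr hc1]

-- ===== VERDICT (by name: the statement is the Claim_ definition above) =====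
theorem delete_distance_spec : Claim_equal_delete_distance := by
  intro str1 str2 _
  unfold Spec_delete_distance delete_distance delete_distance_alt
  simp only []
  have hocc := loop1_getD str1.toList (PySem.Dict.empty : PySem.Dict Char Int)
  set occ : PySem.Dict Char Int := str1.toList.foldl (fun d c =>
      if d.contains c then d.modify c 0 (· + 1) else d.insert c 1) PySem.Dict.empty with hocc_def
  have hg : ∀ c, occ.getD c 0 = (str1.toList.count c : Int) := by
    intro c; rw [hocc c]; simp
  have h0 : ∀ c, 0 ≤ occ.getD c 0 := by intro c; rw [hg c]; positivity
  rw [loop2_sum _ _ _ h0, matched_eq]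
  have : ∀ c ∈ str2.toList.toFinset,
      min (occ.getD c 0) ((str2.toList.count c : Int))
        = min ((str1.toList.count c : Int)) ((str2.toList.count c : Int)) := by
    intro c _; rw [hg c]
  rw [Finset.sum_congr rfl this]
  ring
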